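-- pv_equiv track=rewrite | github.com/mulosbron/EthNodeMap | local/api.py | isp_match
-- ===== SOURCE A (Python) =====
-- def isp_match(ispFilterValue, markerISP):
--     match ispFilterValue:
--         case 'contabo':
--             return 'contabo' in markerISP
--         case 'aws':
--             return any(keyword in markerISP for keyword in ['amazon', 'aws'])
--         case 'azure':
--             return any(keyword in markerISP for keyword in ['microsoft', 'azure'])
--         case 'google':
--             return 'google' in markerISP
--         case 'alibaba':
--             return 'alibaba' in markerISP
--         case 'oracle':
--             return 'oracle' in markerISP
--         case 'ibm':
--             return 'ibm' in markerISP
--         case 'tencent':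
--             return 'tencent' in markerISP
--         case 'ovh':
--             return 'ovh' in markerISP
--         case 'digitalocean':
--             return 'digitalocean' in markerISP
--         case 'linode':
--             return any(keyword in markerISP for keyword in ['linode', 'akamai'])
--         case 'salesforce':
--             return 'salesforce' in markerISP
--         case 'huawei':
--             return 'huawei' in markerISP and 'cloud' in markerISP
--         case 'dell':
--             return 'dell' in markerISP and 'cloud' in markerISP
--         case 'vultr':
--             return 'vultr' in markerISP
--         case 'heroku':
--             return 'heroku' in markerISP
--         case 'hetzner':
--             return 'hetzner' in markerISP
--         case 'scaleway':
--             return 'scaleway' in markerISP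
--         case 'upcloud':
--             return 'upcloud' in markerISP
--         case 'kamatera':
--             return 'kamatera' in markerISP
--         case 'other isps':
--             return all(keyword not in markerISP for keyword in
--                        ['contabo', 'amazon', 'aws', 'microsoft', 'azure', 'google', 'alibaba', 'oracle', 'ibm',
--                         'tencent', 'ovh', 'digitalocean', 'linode', 'akamai', 'salesforce', 'huawei', 'cloud', 'dell',
--                         'cloud', 'vultr', 'heroku', 'hetzner', 'scaleway', 'upcloud', 'kamatera'])
--         case _:
--             return False
-- ===== SOURCE B (Python) =====
-- # Inverted algorithm: first detect WHICH providers appear in markerISP (a set of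
-- # owner keys computed from a keyword->owner index, independent of the filter),
-- # then answer the filter by consulting that detection set.
-- KEYWORD_OWNER = {
--     'contabo': 'contabo',
--     'amazon': 'aws', 'aws': 'aws',
--     'microsoft': 'azure', 'azure': 'azure',
--     'google': 'google',
--     'alibaba': 'alibaba',
--     'oracle': 'oracle',
--     'ibm': 'ibm',
--     'tencent': 'tencent',
--     'ovh': 'ovh',
--     'digitalocean': 'digitalocean',
--     'linode': 'linode', 'akamai': 'linode',
--     'salesforce': 'salesforce',
--     'huawei': 'huawei',
--     'dell': 'dell',
--     'vultr': 'vultr',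
--     'heroku': 'heroku',
--     'hetzner': 'hetzner',
--     'scaleway': 'scaleway',
--     'upcloud': 'upcloud',
--     'kamatera': 'kamatera',
-- }
--
-- def isp_match(ispFilterValue, markerISP):
--     detected = {owner for kw, owner in KEYWORD_OWNER.items() if kw in markerISP}
--     cloud = 'cloud' in markerISP
--     if ispFilterValue == 'other isps':
--         return not detected and not cloud
--     if ispFilterValue in ('huawei', 'dell'):
--         return ispFilterValue in detected and cloud
--     return ispFilterValue in detected
-- ===== Notes on version B (the rewrite author's own statement) =====
-- stated objective: alternative
-- what changed: Inverts the computation: instead of dispatching on the filter value and then testing keywords, B first detects which providers appear in markerISP (a set of owner keys built from a keyword->owner index, independent of the filter) and then answers the filter with one membership/emptiness test on that detection set (plus the shared 'cloud' flag for huawei/dell and 'other isps').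
import Mathlib
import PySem

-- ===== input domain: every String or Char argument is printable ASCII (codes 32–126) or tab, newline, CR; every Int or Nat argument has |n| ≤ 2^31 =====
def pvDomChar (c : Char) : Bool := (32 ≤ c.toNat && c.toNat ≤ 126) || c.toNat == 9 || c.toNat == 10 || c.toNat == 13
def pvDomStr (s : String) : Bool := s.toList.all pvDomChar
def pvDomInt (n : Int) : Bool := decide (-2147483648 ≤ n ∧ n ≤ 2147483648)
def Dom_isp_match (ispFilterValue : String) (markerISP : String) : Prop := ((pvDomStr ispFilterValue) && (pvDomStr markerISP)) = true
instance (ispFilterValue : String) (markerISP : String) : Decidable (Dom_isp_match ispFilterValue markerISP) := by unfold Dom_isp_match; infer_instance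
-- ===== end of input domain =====

-- B inverts the computation: it first detects which providers appear in markerISP (set of owner keys from a keyword->owner index), then answers the filter by one membership/emptiness test on that set; objective: alternative.


-- ===== PORT A =====
-- Python's 'match' on string literals is an equality chain; each branch is its literal substring test(s).
def isp_match (ispFilterValue : String) (markerISP : String) : Bool :=
  if ispFilterValue = "contabo" then PySem.Str.isIn "contabo" markerISP
  else if ispFilterValue = "aws" then ["amazon", "aws"].any (fun keyword => PySem.Str.isIn keyword markerISP)
  else if ispFilterValue = "azure" then ["microsoft", "azure"].any (fun keyword => PySem.Str.isIn keyword markerISP)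
  else if ispFilterValue = "google" then PySem.Str.isIn "google" markerISP
  else if ispFilterValue = "alibaba" then PySem.Str.isIn "alibaba" markerISP
  else if ispFilterValue = "oracle" then PySem.Str.isIn "oracle" markerISP
  else if ispFilterValue = "ibm" then PySem.Str.isIn "ibm" markerISP
  else if ispFilterValue = "tencent" then PySem.Str.isIn "tencent" markerISP
  else if ispFilterValue = "ovh" then PySem.Str.isIn "ovh" markerISP
  else if ispFilterValue = "digitalocean" then PySem.Str.isIn "digitalocean" markerISP
  else if ispFilterValue = "linode" then ["linode", "akamai"].any (fun keyword => PySem.Str.isIn keyword markerISP)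
  else if ispFilterValue = "salesforce" then PySem.Str.isIn "salesforce" markerISP
  else if ispFilterValue = "huawei" then PySem.Str.isIn "huawei" markerISP && PySem.Str.isIn "cloud" markerISP
  else if ispFilterValue = "dell" then PySem.Str.isIn "dell" markerISP && PySem.Str.isIn "cloud" markerISP
  else if ispFilterValue = "vultr" then PySem.Str.isIn "vultr" markerISP
  else if ispFilterValue = "heroku" then PySem.Str.isIn "heroku" markerISP
  else if ispFilterValue = "hetzner" then PySem.Str.isIn "hetzner" markerISP
  else if ispFilterValue = "scaleway" then PySem.Str.isIn "scaleway" markerISP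
  else if ispFilterValue = "upcloud" then PySem.Str.isIn "upcloud" markerISP
  else if ispFilterValue = "kamatera" then PySem.Str.isIn "kamatera" markerISP
  else if ispFilterValue = "other isps" then
    (["contabo", "amazon", "aws", "microsoft", "azure", "google", "alibaba", "oracle", "ibm",
      "tencent", "ovh", "digitalocean", "linode", "akamai", "salesforce", "huawei", "cloud", "dell",
      "cloud", "vultr", "heroku", "hetzner", "scaleway", "upcloud", "kamatera"]).all
      (fun keyword => !(PySem.Str.isIn keyword markerISP))
  else false

-- ===== PORT B =====
-- the keyword -> owning-filter-key index KEYWORD_OWNER (dict literal, distinct keys → association list)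
def pvKeywordOwner : List (String × String) :=
  [("contabo", "contabo"),
   ("amazon", "aws"), ("aws", "aws"),
   ("microsoft", "azure"), ("azure", "azure"),
   ("google", "google"),
   ("alibaba", "alibaba"),
   ("oracle", "oracle"),
   ("ibm", "ibm"),
   ("tencent", "tencent"),
   ("ovh", "ovh"),
   ("digitalocean", "digitalocean"),
   ("linode", "linode"), ("akamai", "linode"),
   ("salesforce", "salesforce"),
   ("huawei", "huawei"),
   ("dell", "dell"),
   ("vultr", "vultr"),
   ("heroku", "heroku"),
   ("hetzner", "hetzner"),
   ("scaleway", "scaleway"),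
   ("upcloud", "upcloud"),
   ("kamatera", "kamatera")]

def isp_match_alt (ispFilterValue : String) (markerISP : String) : Bool :=
  -- the set comprehension {owner for kw, owner in KEYWORD_OWNER.items() if kw in markerISP}
  let detected : PySem.Set String :=
    PySem.Set.ofList ((pvKeywordOwner.filter (fun p => PySem.Str.isIn p.1 markerISP)).map (·.2))
  let cloud := PySem.Str.isIn "cloud" markerISP
  if ispFilterValue = "other isps" then detected.isEmpty && !cloud
  else if ispFilterValue = "huawei" || ispFilterValue = "dell" then
    PySem.Set.contains detected ispFilterValue && cloud
  else PySem.Set.contains detected ispFilterValue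

-- ===== PRECONDITION & SPEC =====
def Spec_isp_match (ispFilterValue : String) (markerISP : String) (out : Bool) : Prop := out = isp_match_alt ispFilterValue markerISP
instance (ispFilterValue : String) (markerISP : String) (out : Bool) : Decidable (Spec_isp_match ispFilterValue markerISP out) := by unfold Spec_isp_match; infer_instance

-- ===== CLAIM (what is proved, stated in full; the proofs are below) =====
def Claim_equal_isp_match : Prop := ∀ (ispFilterValue : String) (markerISP : String), Dom_isp_match ispFilterValue markerISP → Spec_isp_match ispFilterValue markerISP (isp_match ispFilterValue markerISP)

-- ===== LEMMAS AND PROOFS =====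

-- a set built by ofList is empty exactly when the source list is empty
lemma ofList_isEmpty {α : Type} [BEq α] [LawfulBEq α] (l : List α) :
    (PySem.Set.ofList l).isEmpty = l.isEmpty := by
  cases l with
  | nil => rfl
  | cons a t =>
    have hm : a ∈ PySem.Set.ofList (a :: t) := (PySem.Set.mem_ofList _ _).2 (List.mem_cons_self ..)
    simp [List.isEmpty_eq_false_iff, List.ne_nil_of_mem hm]

-- ===== VERDICT (by name: the statement is the Claim_ definition above) =====
set_option maxHeartbeats 2000000 in
theorem isp_match_spec : Claim_equal_isp_match := by
  intro v m _
  unfold Spec_isp_match isp_match isp_match_alt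
  simp only [PySem.Set.contains_eq_listContains, List.contains_eq_mem, ofList_isEmpty]
  by_cases h1 : v = "contabo"
  · subst h1; simp [pvKeywordOwner, PySem.Set.mem_ofList, List.mem_map, List.mem_filter]
  by_cases h2 : v = "aws"
  · subst h2; simp [pvKeywordOwner, PySem.Set.mem_ofList, List.mem_map, List.mem_filter]
  by_cases h3 : v = "azure"
  · subst h3; simp [pvKeywordOwner, PySem.Set.mem_ofList, List.mem_map, List.mem_filter]
  by_cases h4 : v = "google"
  · subst h4; simp [pvKeywordOwner, PySem.Set.mem_ofList, List.mem_map, List.mem_filter]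
  by_cases h5 : v = "alibaba"
  · subst h5; simp [pvKeywordOwner, PySem.Set.mem_ofList, List.mem_map, List.mem_filter]
  by_cases h6 : v = "oracle"
  · subst h6; simp [pvKeywordOwner, PySem.Set.mem_ofList, List.mem_map, List.mem_filter]
  by_cases h7 : v = "ibm"
  · subst h7; simp [pvKeywordOwner, PySem.Set.mem_ofList, List.mem_map, List.mem_filter]
  by_cases h8 : v = "tencent"
  · subst h8; simp [pvKeywordOwner, PySem.Set.mem_ofList, List.mem_map, List.mem_filter]
  by_cases h9 : v = "ovh"
  · subst h9; simp [pvKeywordOwner, PySem.Set.mem_ofList, List.mem_map, List.mem_filter]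
  by_cases h10 : v = "digitalocean"
  · subst h10; simp [pvKeywordOwner, PySem.Set.mem_ofList, List.mem_map, List.mem_filter]
  by_cases h11 : v = "linode"
  · subst h11; simp [pvKeywordOwner, PySem.Set.mem_ofList, List.mem_map, List.mem_filter]
  by_cases h12 : v = "salesforce"
  · subst h12; simp [pvKeywordOwner, PySem.Set.mem_ofList, List.mem_map, List.mem_filter]
  by_cases h13 : v = "huawei"
  · subst h13; simp [pvKeywordOwner, PySem.Set.mem_ofList, List.mem_map, List.mem_filter]
  by_cases h14 : v = "dell"
  · subst h14; simp [pvKeywordOwner, PySem.Set.mem_ofList, List.mem_map, List.mem_filter]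
  by_cases h15 : v = "vultr"
  · subst h15; simp [pvKeywordOwner, PySem.Set.mem_ofList, List.mem_map, List.mem_filter]
  by_cases h16 : v = "heroku"
  · subst h16; simp [pvKeywordOwner, PySem.Set.mem_ofList, List.mem_map, List.mem_filter]
  by_cases h17 : v = "hetzner"
  · subst h17; simp [pvKeywordOwner, PySem.Set.mem_ofList, List.mem_map, List.mem_filter]
  by_cases h18 : v = "scaleway"
  · subst h18; simp [pvKeywordOwner, PySem.Set.mem_ofList, List.mem_map, List.mem_filter]
  by_cases h19 : v = "upcloud"
  · subst h19; simp [pvKeywordOwner, PySem.Set.mem_ofList, List.mem_map, List.mem_filter]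
  by_cases h20 : v = "kamatera"
  · subst h20; simp [pvKeywordOwner, PySem.Set.mem_ofList, List.mem_map, List.mem_filter]
  by_cases h21 : v = "other isps"
  · subst h21
    rw [Bool.eq_iff_iff]
    simp [pvKeywordOwner, List.isEmpty_iff, List.filter_eq_nil_iff]
    tauto
  · simp [pvKeywordOwner, PySem.Set.mem_ofList, List.mem_map, List.mem_filter,
      h1, h2, h3, h4, h5, h6, h7, h8, h9, h10, h11, h12, h13, h14, h15, h16, h17, h18, h19, h20, h21]
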